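-- pv_equiv track=rewrite | github.com/sammchardy/python-binance | exchanges/binance/helpers2.py | trade_check
-- ===== SOURCE A (Python) =====
-- from collections import Counter
--
-- def trade_check(arr, index):
--     if index == 0:
--         return arr[0]
--     previous_check = trade_check(arr, index - 1)
--     value = arr[index]
--     result = set(previous_check).intersection(value)
--     shared, not_shared = remove_single_duplicate(value, previous_check, result)
--     new_result = [x for x in value if x not in result] + not_shared
--     return new_result
--
-- def remove_single_duplicate(arr1, arr2, shared):
--     not_sold_2 = []
--     sold = []
--     not_sold_arr1 = []
--     c_arr1 = Counter(arr1)
--     c_arr2 = Counter(arr2)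
--     for i in shared:
--         v = c_arr2[i]
--         u = c_arr1[i]
--         diff = v - u
--         for j in range(diff):
--             not_sold_2.append(i)
--         if diff < 0:
--             if u == len(arr1):
--                 for o in range(abs(diff)):
--                     not_sold_arr1.append(i)
--             else:
--                 not_sold_arr1.append(i)
--         for j in range(min(u, v)):
--             sold.append(i)
--     return sold, not_sold_arr1
-- ===== SOURCE B (Python) =====
-- from collections import Counter
--
-- def trade_check(arr, index):
--     result = arr[0]
--     for k in range(1, index + 1):
--         level = arr[k]
--         prev = Counter(result)
--         cur = Counter(level)
--         extras = []
--         for x in cur: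
--             if prev[x] and prev[x] < cur[x]:
--                 if cur[x] == len(level):
--                     extras += [x] * (cur[x] - prev[x])
--                 else:
--                     extras.append(x)
--         result = [x for x in level if not prev[x]] + extras
--     return result
-- ===== Notes on version B (the rewrite author's own statement) =====
-- stated objective: simpler
-- what changed: Recursive top-down fold replaced by an iterative left-fold over the levels, with the set intersection and the helper's dead computations (sold/not_sold_2 are discarded by the caller) eliminated in favour of a direct per-level Counter comparison.
-- outside the precondition, e.g. on trade_check([[1, 2], [2, 2, 1, 1]], 1): A returns [1, 2], B returns [2, 1]
import Mathlib
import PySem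

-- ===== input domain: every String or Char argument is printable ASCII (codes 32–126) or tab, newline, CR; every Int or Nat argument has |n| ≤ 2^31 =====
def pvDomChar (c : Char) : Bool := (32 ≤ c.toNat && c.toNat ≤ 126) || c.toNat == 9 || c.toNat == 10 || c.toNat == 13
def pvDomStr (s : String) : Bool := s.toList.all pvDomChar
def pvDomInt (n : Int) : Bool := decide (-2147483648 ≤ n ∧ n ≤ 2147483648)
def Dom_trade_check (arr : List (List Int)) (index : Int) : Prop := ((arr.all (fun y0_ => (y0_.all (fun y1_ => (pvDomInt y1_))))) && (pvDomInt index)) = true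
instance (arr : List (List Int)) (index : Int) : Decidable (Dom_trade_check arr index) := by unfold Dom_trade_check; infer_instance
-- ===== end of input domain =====

-- B replaces A's recursion by an iterative left-fold over the levels and drops the helper's
-- discarded computations (objective: simpler); equal on Pre_ (in-range index, at most one
-- duplicated shared element per level — see the Pre_ comment).

-- ===== PORT A =====
-- c1/c2 are Counter(arr1)/Counter(arr2); Counter lookup of a missing key is 0 (getD _ 0).
def rsdStep (arr1 : List Int) (c1 c2 : PySem.Dict Int Int)
    (st : List Int × List Int × List Int) (i : Int) : List Int × List Int × List Int :=
  let v : Int := c2.getD i 0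
  let u : Int := c1.getD i 0
  let diff : Int := v - u
  let notSold2 := st.2.1 ++ List.replicate diff.toNat i
  let notSoldArr1 :=
    if diff < 0 then
      if u = PySem.List.len arr1 then st.2.2 ++ List.replicate (-diff).toNat i
      else st.2.2 ++ [i]
    else st.2.2
  let sold := st.1 ++ List.replicate (min u v).toNat i
  (sold, notSold2, notSoldArr1)

def remove_single_duplicate (arr1 arr2 : List Int) (shared : List Int) : List Int × List Int :=
  let c1 := PySem.Dict.counter arr1
  let c2 := PySem.Dict.counter arr2
  let st := shared.foldl (rsdStep arr1 c1 c2) ([], [], [])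
  (st.1, st.2.2)

-- Python recurses forever for index < 0 (RecursionError) and arr[0]/arr[index] raise IndexError
-- out of range; both are outside Pre_, so the `.getD []` defaults and the `index < 0` guard
-- (needed for totality) are never reached under the claim.
def trade_check (arr : List (List Int)) (index : Int) : List Int :=
  if index = 0 then (PySem.List.pyGet? arr 0).getD []
  else if index < 0 then []
  else
    let previous_check := trade_check arr (index - 1)
    let value := (PySem.List.pyGet? arr index).getD []
    let result : PySem.Set Int := PySem.Set.inter (PySem.Set.ofList previous_check) value
    let p := remove_single_duplicate value previous_check result
    (value.filter (fun x => !result.contains x)) ++ p.2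
termination_by index.toNat
decreasing_by omega

-- ===== PORT B =====
-- Counter iteration ('for x in cur') is over its keys in first-insertion order: Dict.counter keys.
def trade_check_alt (arr : List (List Int)) (index : Int) : List Int :=
  let init := (PySem.List.pyGet? arr 0).getD []
  (PySem.List.pyRange 1 (index + 1) 1).foldl (fun result k =>
    let level := (PySem.List.pyGet? arr k).getD []
    let prev := PySem.Dict.counter result
    let cur := PySem.Dict.counter level
    let extras := cur.keys.foldl (fun extras x =>
      if prev.getD x 0 != 0 && prev.getD x 0 < cur.getD x 0 then
        if cur.getD x 0 == PySem.List.len level then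
          extras ++ List.replicate (cur.getD x 0 - prev.getD x 0).toNat x
        else extras ++ [x]
      else extras) []
    (level.filter (fun x => prev.getD x 0 == 0)) ++ extras) init

-- ===== PRECONDITION & SPEC =====
-- Pre_ excludes index < 0 (A: RecursionError), index ≥ len(arr) / empty arr (A: IndexError),
-- and inputs where some level shares two DISTINCT duplicated elements with the preceding level:
-- there the relative order of A's appended duplicates follows CPython's hash-dependent set
-- iteration order, an accidental ordering no implementation should be held to.
def Pre_trade_check (arr : List (List Int)) (index : Int) : Prop :=
  0 ≤ index ∧ index < arr.length ∧
    ∀ k ∈ List.range index.toNat,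
      ∀ x ∈ (arr[k + 1]?).getD [], ∀ y ∈ (arr[k + 1]?).getD [],
        2 ≤ ((arr[k + 1]?).getD []).count x → x ∈ (arr[k]?).getD [] →
        2 ≤ ((arr[k + 1]?).getD []).count y → y ∈ (arr[k]?).getD [] → x = y
instance (arr : List (List Int)) (index : Int) : Decidable (Pre_trade_check arr index) := by
  unfold Pre_trade_check; infer_instance

def pvWitness_trade_check : List (List Int) × Int := ([[1, 2], [2, 3], [3, 1]], 2)

def Spec_trade_check (arr : List (List Int)) (index : Int) (out : List Int) : Prop := out = trade_check_alt arr index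
instance (arr : List (List Int)) (index : Int) (out : List Int) : Decidable (Spec_trade_check arr index out) := by unfold Spec_trade_check; infer_instance

-- ===== CLAIM (what is proved, stated in full; the proofs are below) =====
def Claim_equal_trade_check : Prop := ∀ (arr : List (List Int)) (index : Int), Dom_trade_check arr index → Pre_trade_check arr index → Spec_trade_check arr index (trade_check arr index)

-- ===== LEMMAS AND PROOFS =====

-- the per-level step both programs reduce to under Pre_: keep the fresh elements of the level,
-- then append each shared over-represented element (all its excess copies if the level is all
-- copies of it, else one copy)
def pvMult (prev lvl : List Int) (x : Int) : List Int :=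
  if lvl.count x = lvl.length then List.replicate (lvl.count x - prev.count x) x else [x]

def pvExtras (prev lvl : List Int) : List Int :=
  ((PySem.List.dedup lvl).filter
      (fun x => decide (x ∈ prev) && decide (prev.count x < lvl.count x))).flatMap (pvMult prev lvl)

def pvStep (prev lvl : List Int) : List Int :=
  lvl.filter (fun x => !prev.contains x) ++ pvExtras prev lvl

-- the common value: fold of pvStep over levels 0..n
def pvSimple (arr : List (List Int)) : Nat → List Int
  | 0 => (arr[0]?).getD []
  | n + 1 => pvStep (pvSimple arr n) ((arr[n + 1]?).getD [])

lemma pvSimple_subset (arr : List (List Int)) (n : Nat) :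
    ∀ x ∈ pvSimple arr n, x ∈ (arr[n]?).getD [] := by
  cases n with
  | zero => intro x hx; simpa [pvSimple] using hx
  | succ m =>
      intro x hx
      simp only [pvSimple, pvStep] at hx
      rcases List.mem_append.mp hx with hx | hx
      · exact List.mem_of_mem_filter hx
      · unfold pvExtras at hx
        obtain ⟨y, hy, hxy⟩ := List.mem_flatMap.mp hx
        have hyl : y ∈ (arr[m + 1]?).getD [] := by
          have := List.mem_of_mem_filter hy
          rwa [PySem.List.mem_dedup] at this
        unfold pvMult at hxy
        split_ifs at hxy
        · rwa [List.eq_of_mem_replicate hxy]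
        · rwa [(List.mem_singleton.mp hxy)]

lemma rsd_foldl_flatMap (arr1 : List Int) (c1 c2 : PySem.Dict Int Int) (shared : List Int)
    (acc : List Int × List Int × List Int) :
    (shared.foldl (rsdStep arr1 c1 c2) acc).2.2 =
      acc.2.2 ++ shared.flatMap (fun i =>
        if c2.getD i 0 - c1.getD i 0 < 0 then
          if c1.getD i 0 = PySem.List.len arr1 then
            List.replicate (-(c2.getD i 0 - c1.getD i 0)).toNat i
          else [i]
        else []) := by
  induction shared generalizing acc with
  | nil => simp
  | cons a l ih =>
      rw [List.foldl_cons, ih, List.flatMap_cons]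
      simp only [rsdStep]
      split_ifs <;> simp

-- dropping the non-contributing elements before flat-mapping
lemma flatMap_eq_filter_flatMap (l : List Int) (p : Int → Bool) (f : Int → List Int)
    (h : ∀ i ∈ l, p i = false → f i = []) : l.flatMap f = (l.filter p).flatMap f := by
  induction l with
  | nil => rfl
  | cons a t ih =>
      rw [List.flatMap_cons, List.filter_cons,
        ih (fun i hi => h i (by simp [hi]))]
      by_cases hp : p a = true
      · simp [hp]
      · rw [h a (by simp) (by simpa using hp)]
        simp [hp]

lemma flatMap_congr_mem (l : List Int) (f g : Int → List Int)
    (h : ∀ i ∈ l, f i = g i) : l.flatMap f = l.flatMap g := by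
  induction l with
  | nil => rfl
  | cons a t ih =>
      rw [List.flatMap_cons, List.flatMap_cons, h a (by simp),
        ih (fun i hi => h i (by simp [hi]))]

lemma filter_eq_singleton_of_unique {l : List Int} {p : Int → Bool} {a : Int}
    (hn : l.Nodup) (ha : a ∈ l) (hpa : p a = true) (hu : ∀ y ∈ l, p y = true → y = a) :
    l.filter p = [a] := by
  induction l with
  | nil => cases ha
  | cons b t ih =>
      rcases List.mem_cons.mp ha with rfl | hat
      · rw [List.filter_cons_of_pos hpa, List.filter_eq_nil_iff.mpr]
        intro y hy hpy
        exact absurd (hu y (by simp [hy]) hpy ▸ hy) (List.nodup_cons.mp hn).1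
      · have hb : p b = false := by
          by_contra hpb
          have : b = a := hu b (by simp) (by simpa using hpb)
          exact (List.nodup_cons.mp hn).1 (this ▸ hat)
        rw [List.filter_cons_of_neg (by simp [hb])]
        exact ih (List.nodup_cons.mp hn).2 hat (fun y hy => hu y (by simp [hy]))

-- both nodup index lists (A's shared set, B's counter keys) filter down to the same ≤1 candidates
lemma filters_eq (prev lvl : List Int)
    (h1 : ∀ x ∈ lvl, ∀ y ∈ lvl, 2 ≤ lvl.count x → x ∈ prev → 2 ≤ lvl.count y → y ∈ prev → x = y) :
    (PySem.Set.inter (PySem.Set.ofList prev) lvl).filter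
        (fun x => decide (x ∈ prev) && decide (prev.count x < lvl.count x)) =
      (PySem.List.dedup lvl).filter
        (fun x => decide (x ∈ prev) && decide (prev.count x < lvl.count x)) := by
  by_cases hex : ∃ x ∈ lvl, x ∈ prev ∧ prev.count x < lvl.count x
  · obtain ⟨x0, hx0l, hx0p, hx0c⟩ := hex
    have hcand : ∀ y ∈ lvl, y ∈ prev → prev.count y < lvl.count y → y = x0 := by
      intro y hyl hyp hyc
      have hy2 : 2 ≤ lvl.count y := by
        have := List.count_pos_iff.mpr hyp
        omega
      have hx2 : 2 ≤ lvl.count x0 := by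
        have := List.count_pos_iff.mpr hx0p
        omega
      exact h1 y hyl x0 hx0l hy2 hyp hx2 hx0p
    rw [filter_eq_singleton_of_unique
        (PySem.Set.nodup_inter (PySem.Set.ofList prev) lvl (PySem.Set.nodup_ofList prev))
        (by rw [PySem.Set.mem_inter, PySem.Set.mem_ofList]; exact ⟨hx0p, hx0l⟩)
        (by simp [hx0p, hx0c]) ?_,
      filter_eq_singleton_of_unique (by rw [PySem.List.dedup_eq_ofList]; exact PySem.Set.nodup_ofList lvl)
        (by rw [PySem.List.mem_dedup]; exact hx0l)
        (by simp [hx0p, hx0c]) ?_]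
    · intro y hy hpy
      rw [PySem.List.mem_dedup] at hy
      simp only [Bool.and_eq_true, decide_eq_true_eq] at hpy
      exact hcand y hy hpy.1 hpy.2
    · intro y hy hpy
      rw [PySem.Set.mem_inter, PySem.Set.mem_ofList] at hy
      simp only [Bool.and_eq_true, decide_eq_true_eq] at hpy
      exact hcand y hy.2 hpy.1 hpy.2
  · rw [List.filter_eq_nil_iff.mpr, List.filter_eq_nil_iff.mpr]
    · intro y hy
      rw [PySem.List.mem_dedup] at hy
      simp only [Bool.and_eq_true, decide_eq_true_eq, not_and]
      intro hyp hyc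
      exact hex ⟨y, hy, hyp, hyc⟩
    · intro y hy
      rw [PySem.Set.mem_inter, PySem.Set.mem_ofList] at hy
      simp only [Bool.and_eq_true, decide_eq_true_eq, not_and]
      intro hyp hyc
      exact hex ⟨y, hy.2, hyp, hyc⟩

lemma stepA (prev lvl : List Int)
    (h1 : ∀ x ∈ lvl, ∀ y ∈ lvl, 2 ≤ lvl.count x → x ∈ prev → 2 ≤ lvl.count y → y ∈ prev → x = y) :
    (lvl.filter (fun x =>
        !(PySem.Set.contains (PySem.Set.inter (PySem.Set.ofList prev) lvl) x))) ++
      (remove_single_duplicate lvl prev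
        (PySem.Set.inter (PySem.Set.ofList prev) lvl)).2 = pvStep prev lvl := by
  unfold remove_single_duplicate pvStep
  congr 1
  · refine List.filter_congr ?_
    intro x hx
    have : x ∈ PySem.Set.inter (PySem.Set.ofList prev) lvl ↔ x ∈ prev := by
      rw [PySem.Set.mem_inter, PySem.Set.mem_ofList]
      simp [hx]
    simp [this]
  · rw [rsd_foldl_flatMap]
    simp only [List.nil_append]
    unfold pvExtras
    rw [flatMap_eq_filter_flatMap _
        (fun x => decide (x ∈ prev) && decide (prev.count x < lvl.count x)) _ ?_,
      filters_eq prev lvl h1]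
    · refine flatMap_congr_mem _ _ _ ?_
      intro i hi
      have hq := List.of_mem_filter hi
      have hil : i ∈ lvl := by
        have := List.mem_of_mem_filter hi
        rwa [PySem.List.mem_dedup] at this
      simp only [Bool.and_eq_true, decide_eq_true_eq] at hq
      obtain ⟨hip, hic⟩ := hq
      simp only [PySem.Dict.getD_counter]
      rw [if_pos (by omega)]
      unfold pvMult
      by_cases hlen : lvl.count i = lvl.length
      · rw [if_pos (by simp [PySem.List.len_eq]; exact_mod_cast hlen), if_pos hlen]
        congr 1
        omega
      · rw [if_neg (by simp [PySem.List.len_eq]; exact_mod_cast hlen), if_neg hlen]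
    · intro i hi hq
      rw [PySem.Set.mem_inter, PySem.Set.mem_ofList] at hi
      rw [if_neg]
      simp only [PySem.Dict.getD_counter]
      have hnotlt : ¬ prev.count i < lvl.count i := by simpa [hi.1] using hq
      omega

lemma stepB (prev lvl : List Int) :
    (lvl.filter (fun x => (PySem.Dict.counter prev).getD x 0 == 0)) ++
      (PySem.Dict.counter lvl).keys.foldl (fun extras x =>
        if (PySem.Dict.counter prev).getD x 0 != 0 &&
            (PySem.Dict.counter prev).getD x 0 < (PySem.Dict.counter lvl).getD x 0 then
          if (PySem.Dict.counter lvl).getD x 0 == PySem.List.len lvl then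
            extras ++ List.replicate ((PySem.Dict.counter lvl).getD x 0 -
              (PySem.Dict.counter prev).getD x 0).toNat x
          else extras ++ [x]
        else extras) [] = pvStep prev lvl := by
  unfold pvStep
  congr 1
  · refine List.filter_congr ?_
    intro x _
    by_cases hxp : x ∈ prev
    · have hc := List.count_pos_iff.mpr hxp
      simp only [PySem.Dict.getD_counter]
      simp [hxp]
      omega
    · simp [PySem.Dict.getD_counter, hxp, List.count_eq_zero.mpr hxp]
  · have hfun : (fun (extras : List Int) (x : Int) =>
        if (PySem.Dict.counter prev).getD x 0 != 0 &&
            (PySem.Dict.counter prev).getD x 0 < (PySem.Dict.counter lvl).getD x 0 then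
          if (PySem.Dict.counter lvl).getD x 0 == PySem.List.len lvl then
            extras ++ List.replicate ((PySem.Dict.counter lvl).getD x 0 -
              (PySem.Dict.counter prev).getD x 0).toNat x
          else extras ++ [x]
        else extras) = (fun extras x => extras ++
          (if (PySem.Dict.counter prev).getD x 0 != 0 &&
              (PySem.Dict.counter prev).getD x 0 < (PySem.Dict.counter lvl).getD x 0 then
            if (PySem.Dict.counter lvl).getD x 0 == PySem.List.len lvl then
              List.replicate ((PySem.Dict.counter lvl).getD x 0 -
                (PySem.Dict.counter prev).getD x 0).toNat x
            else [x]
          else [])) := by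
      funext extras x
      split_ifs <;> simp
    rw [hfun, PySem.List.foldl_append_eq_flatMap]
    simp only [List.nil_append]
    unfold pvExtras
    rw [PySem.Dict.keys_counter, ← PySem.List.dedup_eq_ofList,
      flatMap_eq_filter_flatMap _
        (fun x => decide (x ∈ prev) && decide (prev.count x < lvl.count x)) _ ?_]
    · refine flatMap_congr_mem _ _ _ ?_
      intro i hi
      have hq := List.of_mem_filter hi
      simp only [Bool.and_eq_true, decide_eq_true_eq] at hq
      obtain ⟨hip, hic⟩ := hq
      have hc := List.count_pos_iff.mpr hip
      simp only [PySem.Dict.getD_counter]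
      rw [if_pos (by simp; omega)]
      unfold pvMult
      by_cases hlen : lvl.count i = lvl.length
      · rw [if_pos (by simp [PySem.List.len_eq]; exact_mod_cast hlen), if_pos hlen]
        congr 1
        omega
      · rw [if_neg (by simp [PySem.List.len_eq]; exact_mod_cast hlen), if_neg hlen]
    · intro i _ hq
      simp only [PySem.Dict.getD_counter]
      rw [if_neg]
      intro hcon
      simp only [bne_iff_ne, ne_eq, Bool.and_eq_true, decide_eq_true_eq] at hcon
      have hip : i ∈ prev := List.count_pos_iff.mp (by omega)
      have hlt : prev.count i < lvl.count i := by exact_mod_cast hcon.2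
      simp [hip, hlt] at hq

lemma trade_check_eq_simple (arr : List (List Int)) (n : Nat) (h : n < arr.length)
    (hnod : ∀ k ∈ List.range n,
      ∀ x ∈ (arr[k + 1]?).getD [], ∀ y ∈ (arr[k + 1]?).getD [],
        2 ≤ ((arr[k + 1]?).getD []).count x → x ∈ (arr[k]?).getD [] →
        2 ≤ ((arr[k + 1]?).getD []).count y → y ∈ (arr[k]?).getD [] → x = y) :
    trade_check arr (n : Int) = pvSimple arr n := by
  induction n with
  | zero => simp [trade_check, pvSimple, PySem.List.pyGet?_zero]
  | succ m ih =>
      have hm : m < arr.length := by omega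
      have hkm := hnod m (List.mem_range.mpr (by omega))
      rw [List.getElem?_eq_getElem h] at hkm
      have hsub := pvSimple_subset arr m
      have h1 : ∀ x ∈ arr[m + 1]'h, ∀ y ∈ arr[m + 1]'h,
          2 ≤ (arr[m + 1]'h).count x → x ∈ pvSimple arr m →
          2 ≤ (arr[m + 1]'h).count y → y ∈ pvSimple arr m → x = y :=
        fun x hx y hy hcx hxp hcy hyp =>
          hkm x hx y hy hcx (hsub x hxp) hcy (hsub y hyp)
      have hprev : trade_check arr ((m : Int) + 1 - 1) = pvSimple arr m := by
        rw [show ((m : Int) + 1 - 1) = (m : Int) by ring]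
        exact ih hm (fun k hk => hnod k (by rw [List.mem_range] at hk ⊢; omega))
      rw [trade_check]
      have hc1 : ¬ ((m + 1 : Nat) : Int) = 0 := by omega
      have hc2 : ¬ ((m + 1 : Nat) : Int) < 0 := by omega
      rw [if_neg hc1, if_neg hc2]
      simp only [Nat.cast_add, Nat.cast_one] at hprev ⊢
      rw [hprev]
      have hv : (PySem.List.pyGet? arr ((m : Int) + 1)).getD [] = arr[m + 1]'h := by
        rw [show ((m : Int) + 1) = ((m + 1 : Nat) : Int) by push_cast; ring]
        rw [PySem.List.pyGet?_natCast, List.getElem?_eq_getElem h]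
        rfl
      rw [hv]
      have := stepA (pvSimple arr m) (arr[m + 1]'h) h1
      simpa [pvSimple, List.getElem?_eq_getElem h] using this

lemma trade_check_alt_eq_simple (arr : List (List Int)) (n : Nat) (h : n < arr.length) :
    trade_check_alt arr (n : Int) = pvSimple arr n := by
  induction n with
  | zero =>
      simp [trade_check_alt, pvSimple, PySem.List.pyGet?_zero]
  | succ m ih =>
      have hm : m < arr.length := by omega
      have hrange : PySem.List.pyRange 1 (((m + 1 : Nat) : Int) + 1) 1 =
          PySem.List.pyRange 1 ((m : Int) + 1) 1 ++ [(m : Int) + 1] := by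
        rw [show (((m + 1 : Nat) : Int) + 1) = ((m : Int) + 1) + 1 by push_cast; ring]
        exact PySem.List.pyRange_one_succ_right (by omega)
      rw [trade_check_alt]
      simp only [hrange, List.foldl_append, List.foldl_cons, List.foldl_nil]
      have ihv := ih hm
      rw [trade_check_alt] at ihv
      simp only [ihv]
      have hv : (PySem.List.pyGet? arr ((m : Int) + 1)).getD [] = arr[m + 1]'h := by
        rw [show ((m : Int) + 1) = ((m + 1 : Nat) : Int) by push_cast; ring]
        rw [PySem.List.pyGet?_natCast, List.getElem?_eq_getElem h]
        rfl
      rw [hv]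
      have := stepB (pvSimple arr m) (arr[m + 1]'h)
      simpa [pvSimple, List.getElem?_eq_getElem h] using this

-- ===== VERDICT (by name: the statement is the Claim_ definition above) =====
theorem trade_check_spec : Claim_equal_trade_check := by
  intro arr index _hdom hpre
  obtain ⟨h0, hlt, hnod⟩ := hpre
  have hn : index = (index.toNat : Int) := by omega
  have hlen : index.toNat < arr.length := by omega
  unfold Spec_trade_check
  rw [hn, trade_check_eq_simple arr index.toNat hlen hnod,
      trade_check_alt_eq_simple arr index.toNat hlen]
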